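-- pv_equiv track=rewrite | github.com/Only-Kotlin/only_just_python | scoville.py | solution
-- ===== SOURCE A (Python) =====
-- def solution(scoville, K):
--     queue = [s for s in scoville]
--
--     answer = 0
--
--     while True:
--         if min(queue) <= K:
--             if len(queue) == 1 and K >= queue[0]:
--                 return -1
--             low = min(queue)
--             queue.remove(low)
--             queue.append(low + (min(queue) * min(queue)))
--             answer += 1
--             queue.remove(min(queue))
--         else:
--             return answer
-- ===== SOURCE B (Python) =====
-- def solution(scoville, K):
--     # Sort once, then maintain the pot as a sorted list: the two smallest are
--     # always at the front, and each mixed value is inserted at its sorted spot.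
--     q = sorted(scoville)
--     answer = 0
--     while True:
--         if q[0] > K:
--             return answer
--         if len(q) == 1:
--             return -1
--         a = q[0]
--         b = q[1]
--         del q[0]
--         x = a + b * b
--         i = 0
--         while i < len(q) and q[i] <= x:
--             i += 1
--         q.insert(i, x)
--         del q[0]
--         answer += 1
-- ===== Notes on version B (the rewrite author's own statement) =====
-- stated objective: alternative
-- what changed: A rescans an unsorted list with min() four times and remove() twice per round; B sorts once and maintains a sorted list, taking the two smallest from the front and inserting each mixed value at its sorted position.
-- outside the precondition, e.g. on solution([], 0): A raises ValueError, B raises IndexError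
import Mathlib
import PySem

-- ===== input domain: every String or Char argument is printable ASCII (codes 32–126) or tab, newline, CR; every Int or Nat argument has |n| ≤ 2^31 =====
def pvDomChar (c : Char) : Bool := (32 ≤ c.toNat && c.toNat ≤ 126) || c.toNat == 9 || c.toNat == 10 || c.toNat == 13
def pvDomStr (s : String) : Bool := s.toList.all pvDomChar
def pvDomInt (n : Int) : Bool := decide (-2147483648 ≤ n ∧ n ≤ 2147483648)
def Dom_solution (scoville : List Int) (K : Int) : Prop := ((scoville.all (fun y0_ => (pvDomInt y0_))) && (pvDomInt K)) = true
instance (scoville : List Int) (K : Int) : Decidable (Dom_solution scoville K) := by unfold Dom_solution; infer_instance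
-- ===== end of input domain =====

-- B replaces A's repeated min()-scans and remove()-passes over an unsorted list by
-- sorting once and maintaining a sorted list (mix at the front, insert at the sorted spot);
-- objective: alternative algorithm. Python A mutates only its local copy; return values only.

-- ===== PORT A =====
-- while True loop as fuel recursion; each iteration shrinks the list by one, so
-- fuel = initial length always suffices; the 0 defaults are unreachable under Pre_.
def solutionGo (K : Int) : Nat → List Int → Int → Int
  | 0, _, _ => 0
  | fuel+1, queue, answer =>
    match PySem.List.min? queue (fun x => x) with
    | none => 0  -- min([]) raises ValueError: excluded by Pre_
    | some m =>
      if m ≤ K then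
        if queue.length = 1 ∧ K ≥ (PySem.List.pyGet? queue 0).getD 0 then -1
        else
          match PySem.List.remove? queue m with
          | none => 0
          | some q1 =>
            match PySem.List.min? q1 (fun x => x) with
            | none => 0
            | some m2 =>
              let q2 := q1 ++ [m + m2 * m2]
              match PySem.List.min? q2 (fun x => x) with
              | none => 0
              | some m3 =>
                match PySem.List.remove? q2 m3 with
                | none => 0
                | some q3 => solutionGo K fuel q3 (answer + 1)
      else answer

def solution (scoville : List Int) (K : Int) : Int :=
  let queue := scoville.map (fun s => s)  -- queue = [s for s in scoville]
  solutionGo K queue.length queue 0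

-- ===== PORT B =====
-- the inner index scan 'while i < len(q) and q[i] <= x: i += 1'
def insCount (x : Int) : List Int → Nat
  | [] => 0
  | y :: ys => if y ≤ x then insCount x ys + 1 else 0

def solutionAltGo (K : Int) : Nat → List Int → Int → Int
  | 0, _, _ => 0
  | fuel+1, q, answer =>
    match q with
    | [] => 0  -- unreachable: the list stays nonempty
    | a :: rest =>
      if K < a then answer  -- q[0] > K
      else
        match rest with
        | [] => -1  -- len(q) == 1
        | b :: _ =>
          let x := a + b * b
          let i := insCount x rest
          -- q.insert(i, x): exact since 0 ≤ i ≤ len(rest); then del q[0] = .tail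
          let q2 := rest.take i ++ x :: rest.drop i
          solutionAltGo K fuel q2.tail (answer + 1)

def solution_alt (scoville : List Int) (K : Int) : Int :=
  solutionAltGo K scoville.length (PySem.List.sorted scoville (fun x => x) false) 0

-- ===== PRECONDITION & SPEC =====
-- Pre_ excludes only the empty list, on which Python A raises ValueError (min of empty sequence).
def Pre_solution (scoville : List Int) (_K : Int) : Prop := scoville ≠ []
instance (scoville : List Int) (K : Int) : Decidable (Pre_solution scoville K) := by
  unfold Pre_solution; infer_instance
def pvWitness_solution : List Int × Int := ([1, 2, 3, 9, 10, 12], 7)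

def Spec_solution (scoville : List Int) (K : Int) (out : Int) : Prop := out = solution_alt scoville K
instance (scoville : List Int) (K : Int) (out : Int) : Decidable (Spec_solution scoville K out) := by
  unfold Spec_solution; infer_instance

-- ===== CLAIM (what is proved, stated in full; the proofs are below) =====
def Claim_equal_solution : Prop := ∀ (scoville : List Int) (K : Int), Dom_solution scoville K → Pre_solution scoville K → Spec_solution scoville K (solution scoville K)

-- ===== LEMMAS AND PROOFS =====

-- the head of a sorted rearrangement is what Python's min() returns
theorem min_id_of_perm_sorted {q t : List Int} {a : Int}
    (hp : q.Perm (a :: t)) (hs : (a :: t).Pairwise (· ≤ ·)) :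
    PySem.List.min? q (fun x => x) = some a := by
  have hne : q ≠ [] := by
    intro h; subst h; exact (List.cons_ne_nil a t) hp.nil_eq.symm
  obtain ⟨m, hm⟩ : ∃ m, PySem.List.min? q (fun x => x) = some m := by
    cases h : PySem.List.min? q (fun x => x) with
    | none => exact absurd ((PySem.List.min?_eq_none_iff q (fun x => x)).mp h) hne
    | some m => exact ⟨m, rfl⟩
  have hmem : m ∈ q := PySem.List.min?_mem hm
  have hma : m ≤ a := PySem.List.min?_isMin hm a (hp.mem_iff.mpr (List.mem_cons_self ..))
  have ham : a ≤ m := by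
    rcases List.mem_cons.mp (hp.mem_iff.mp hmem) with h | h
    · omega
    · exact (List.pairwise_cons.mp hs).1 m h
  rw [hm]; exact congrArg _ (le_antisymm hma ham)

theorem ins_perm (x : Int) (l : List Int) :
    (l.take (insCount x l) ++ x :: l.drop (insCount x l)).Perm (x :: l) := by
  have h := List.perm_middle (l₁ := l.take (insCount x l)) (l₂ := l.drop (insCount x l)) (a := x)
  simpa [List.take_append_drop] using h

theorem ins_sorted (x : Int) (l : List Int) (hs : l.Pairwise (· ≤ ·)) :
    (l.take (insCount x l) ++ x :: l.drop (insCount x l)).Pairwise (· ≤ ·) := by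
  induction l with
  | nil => simp [insCount]
  | cons y ys ih =>
    rcases List.pairwise_cons.mp hs with ⟨hy, hys⟩
    by_cases hyx : y ≤ x
    · simp only [insCount, if_pos hyx, List.take_succ_cons, List.drop_succ_cons,
        List.cons_append, List.pairwise_cons]
      refine ⟨?_, ih hys⟩
      intro z hz
      rcases List.mem_cons.mp ((ins_perm x ys).mem_iff.mp hz) with h | h
      · omega
      · exact hy z h
    · simp only [insCount, if_neg hyx, List.take_zero, List.drop_zero, List.nil_append,
        List.pairwise_cons]
      refine ⟨?_, hy, hys⟩
      intro z hz
      rcases List.mem_cons.mp hz with h | h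
      · omega
      · have := hy z h; omega

theorem go_eq (K : Int) : ∀ (fuel : Nat) (q1 q2 : List Int) (ans : Int),
    q1.Perm q2 → q2.Pairwise (· ≤ ·) →
    solutionGo K fuel q1 ans = solutionAltGo K fuel q2 ans := by
  intro fuel
  induction fuel with
  | zero => intro q1 q2 ans _ _; rfl
  | succ fuel ih =>
    intro q1 q2 ans hp hs
    cases q2 with
    | nil =>
      have h1 : q1 = [] := hp.eq_nil
      subst h1
      simp [solutionGo, solutionAltGo, PySem.List.min?]
    | cons a t =>
      have hmin : PySem.List.min? q1 (fun x => x) = some a := min_id_of_perm_sorted hp hs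
      cases t with
      | nil =>
        have h1 : q1 = [a] := List.perm_singleton.mp hp
        subst h1
        simp only [solutionGo, solutionAltGo, hmin]
        by_cases hK : a ≤ K
        · have hK' : ¬ K < a := by omega
          simp [hK, hK']
        · have hK' : K < a := by omega
          simp [hK, hK']
      | cons b t' =>
        have hlen : q1.length = (a :: b :: t').length := hp.length_eq
        have hane : a ∈ q1 := hp.mem_iff.mpr (List.mem_cons_self ..)
        have hrem1 : PySem.List.remove? q1 a = some (q1.erase a) :=
          PySem.List.remove?_eq_some_erase q1 a hane
        have hq1' : (q1.erase a).Perm (b :: t') := by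
          have := hp.erase a
          simp [List.erase_cons_head] at this
          exact this
        have hstail : (b :: t').Pairwise (· ≤ ·) := (List.pairwise_cons.mp hs).2
        have hmin2 : PySem.List.min? (q1.erase a) (fun x => x) = some b :=
          min_id_of_perm_sorted hq1' hstail
        have hrperm := ins_perm (a + b * b) (b :: t')
        have hrsorted := ins_sorted (a + b * b) (b :: t') hstail
        have hq2p : (q1.erase a ++ [a + b * b]).Perm
            ((b :: t').take (insCount (a + b * b) (b :: t')) ++
              (a + b * b) :: (b :: t').drop (insCount (a + b * b) (b :: t'))) := by
          refine List.Perm.trans ?_ hrperm.symm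
          have h1 : (q1.erase a ++ [a + b * b]).Perm ((a + b * b) :: q1.erase a) := by
            have h := List.perm_middle (l₁ := q1.erase a) (l₂ := ([] : List Int)) (a := a + b * b)
            simp only [List.append_nil] at h
            exact h
          exact h1.trans (hq1'.cons (a + b * b))
        obtain ⟨c, r', hrc⟩ : ∃ c r',
            (b :: t').take (insCount (a + b * b) (b :: t')) ++
              (a + b * b) :: (b :: t').drop (insCount (a + b * b) (b :: t')) = c :: r' := by
          cases hre : (b :: t').take (insCount (a + b * b) (b :: t')) ++
              (a + b * b) :: (b :: t').drop (insCount (a + b * b) (b :: t')) with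
          | nil => rw [hre] at hrperm; exact absurd hrperm.symm.eq_nil (List.cons_ne_nil _ _)
          | cons c r' => exact ⟨c, r', rfl⟩
        rw [hrc] at hrperm hrsorted hq2p
        have hmin3 : PySem.List.min? (q1.erase a ++ [a + b * b]) (fun y => y) = some c :=
          min_id_of_perm_sorted hq2p hrsorted
        have hcmem : c ∈ q1.erase a ++ [a + b * b] :=
          hq2p.mem_iff.mpr (List.mem_cons_self ..)
        have hrem3 : PySem.List.remove? (q1.erase a ++ [a + b * b]) c =
            some ((q1.erase a ++ [a + b * b]).erase c) :=
          PySem.List.remove?_eq_some_erase _ c hcmem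
        have hq3p : ((q1.erase a ++ [a + b * b]).erase c).Perm r' := by
          have h := hq2p.erase c
          rwa [List.erase_cons_head] at h
        have hr'sorted : r'.Pairwise (· ≤ ·) := (List.pairwise_cons.mp hrsorted).2
        have hlen1 : ¬ (q1.length = 1 ∧ K ≥ (PySem.List.pyGet? q1 0).getD 0) := by
          intro h; rw [hlen] at h; simp at h
        simp only [solutionGo, solutionAltGo, hmin, hrem1, hmin2]
        by_cases hK : a ≤ K
        · have hK' : ¬ K < a := by omega
          simp only [if_pos hK, if_neg hK', if_neg hlen1]
          simp only [hmin3, hrem3, hrc]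
          exact ih ((q1.erase a ++ [a + b * b]).erase c) r' (ans + 1) hq3p hr'sorted
        · have hK' : K < a := by omega
          simp [hK, hK']

-- ===== VERDICT (by name: the statement is the Claim_ definition above) =====
theorem solution_spec : Claim_equal_solution := by
  intro scoville K _ _
  unfold Spec_solution solution solution_alt
  simp only [List.map_id']
  exact go_eq K scoville.length scoville _ 0
    (PySem.List.sorted_perm scoville (fun x => x) false).symm
    (PySem.List.sorted_pairwise scoville (fun x => x))
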